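-- pv_equiv track=rewrite | github.com/yzamari/viral_videos | src/generators/vertex_ai_veo2_client.py | _generate_audio_suggestions
-- ===== SOURCE A (Python) =====
-- def _generate_audio_suggestions(prompt: str) -> str:
--     """Generate appropriate audio suggestions based on video prompt"""
--     prompt_lower = prompt.lower()
--
--     # Analyze prompt content to suggest appropriate audio
--     audio_elements = []
--
--     # Nature/outdoor scenes
--     if any(
--         word in prompt_lower for word in [
--             'forest',
--             'nature',
--             'outdoor',
--             'trees',
--             'birds']):
--         audio_elements.append("gentle bird songs, rustling leaves")
--     elif any(word in prompt_lower for word in ['ocean', 'sea', 'beach', 'waves']):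
--         audio_elements.append("ocean waves, seagull calls")
--     elif any(word in prompt_lower for word in ['city', 'street', 'urban', 'traffic']):
--         audio_elements.append("distant city traffic, urban ambiance")
--
--     # Character interactions
--     if any(
--         word in prompt_lower for word in [
--             'talking',
--             'speaking',
--             'conversation',
--             'dialogue']):
--         audio_elements.append("clear dialogue, natural speech")
--     elif any(word in prompt_lower for word in ['laughing', 'happy', 'joy']):
--         audio_elements.append("joyful laughter, cheerful voices")
--     elif any(word in prompt_lower for word in ['crying', 'sad', 'emotional']):
--         audio_elements.append("emotional breathing, soft sobs")
--
--     # Action scenes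
--     if any(
--         word in prompt_lower for word in [
--             'running',
--             'chase',
--             'fast',
--             'action']):
--         audio_elements.append(
--             "footsteps, heavy breathing, dynamic movement sounds")
--     elif any(word in prompt_lower for word in ['fighting', 'battle', 'combat']):
--         audio_elements.append("impact sounds, movement, tension")
--
--     # Music/instruments
--     if any(
--         word in prompt_lower for word in [
--             'music',
--             'piano',
--             'guitar',
--             'singing']):
--         audio_elements.append("melodic music, instrumental harmony")
--     elif any(word in prompt_lower for word in ['dancing', 'party', 'celebration']):
--         audio_elements.append("upbeat music, celebratory sounds")
--
--     # Weather/environment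
--     if any(word in prompt_lower for word in ['rain', 'storm', 'thunder']):
--         audio_elements.append("rainfall, distant thunder")
--     elif any(word in prompt_lower for word in ['wind', 'windy']):
--         audio_elements.append("gentle wind sounds")
--
--     # Default ambient sound
--     if not audio_elements:
--         audio_elements.append("subtle ambient sound, natural atmosphere")
--
--     return ", ".join(audio_elements)
-- ===== SOURCE B (Python) =====
-- # One flat keyword index aggregated by min-rank, instead of six if/elif chains:
-- # every keyword maps to (group, rank); a single scan records the minimum matching
-- # rank per group in a dict, and the answer is emitted over sorted group ids.
-- _KEYWORDS = {
--     'forest': (0, 0), 'nature': (0, 0), 'outdoor': (0, 0), 'trees': (0, 0), 'birds': (0, 0),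
--     'ocean': (0, 1), 'sea': (0, 1), 'beach': (0, 1), 'waves': (0, 1),
--     'city': (0, 2), 'street': (0, 2), 'urban': (0, 2), 'traffic': (0, 2),
--     'talking': (1, 0), 'speaking': (1, 0), 'conversation': (1, 0), 'dialogue': (1, 0),
--     'laughing': (1, 1), 'happy': (1, 1), 'joy': (1, 1),
--     'crying': (1, 2), 'sad': (1, 2), 'emotional': (1, 2),
--     'running': (2, 0), 'chase': (2, 0), 'fast': (2, 0), 'action': (2, 0),
--     'fighting': (2, 1), 'battle': (2, 1), 'combat': (2, 1),
--     'music': (3, 0), 'piano': (3, 0), 'guitar': (3, 0), 'singing': (3, 0),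
--     'dancing': (3, 1), 'party': (3, 1), 'celebration': (3, 1),
--     'rain': (4, 0), 'storm': (4, 0), 'thunder': (4, 0),
--     'wind': (4, 1), 'windy': (4, 1),
-- }
--
-- _SUGGESTIONS = [
--     ["gentle bird songs, rustling leaves", "ocean waves, seagull calls",
--      "distant city traffic, urban ambiance"],
--     ["clear dialogue, natural speech", "joyful laughter, cheerful voices",
--      "emotional breathing, soft sobs"],
--     ["footsteps, heavy breathing, dynamic movement sounds", "impact sounds, movement, tension"],
--     ["melodic music, instrumental harmony", "upbeat music, celebratory sounds"],
--     ["rainfall, distant thunder", "gentle wind sounds"],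
-- ]
--
--
-- def _generate_audio_suggestions(prompt: str) -> str:
--     """Generate appropriate audio suggestions based on video prompt (keyword index + min-rank aggregation)."""
--     prompt_lower = prompt.lower()
--     best = {}
--     for kw, (g, r) in _KEYWORDS.items():
--         if kw in prompt_lower and (g not in best or r < best[g]):
--             best[g] = r
--     if not best:
--         return "subtle ambient sound, natural atmosphere"
--     return ", ".join(_SUGGESTIONS[g][best[g]] for g in sorted(best))
-- ===== Notes on version B (the rewrite author's own statement) =====
-- stated objective: alternative
-- what changed: Replaces the six hardcoded if/elif first-match chains with a single flat keyword->(group,rank) index scanned once, aggregating the minimum matching rank per group in a dict and emitting suggestions over sorted group ids.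
import Mathlib
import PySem

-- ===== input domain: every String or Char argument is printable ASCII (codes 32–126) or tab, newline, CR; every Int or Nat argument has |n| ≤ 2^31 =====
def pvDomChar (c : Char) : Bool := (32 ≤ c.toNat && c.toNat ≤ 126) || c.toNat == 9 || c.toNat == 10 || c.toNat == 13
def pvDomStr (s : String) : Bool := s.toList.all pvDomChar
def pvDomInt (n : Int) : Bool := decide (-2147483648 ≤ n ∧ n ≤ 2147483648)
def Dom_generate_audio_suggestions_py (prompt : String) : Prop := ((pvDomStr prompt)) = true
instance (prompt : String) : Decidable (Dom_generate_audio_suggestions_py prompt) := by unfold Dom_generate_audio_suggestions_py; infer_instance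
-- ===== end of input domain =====

-- B replaces A's six if/elif chains with one flat keyword->(group,rank) index scanned once,
-- aggregating the minimum matching rank per group in a dict (objective: alternative).

-- ===== PORT A =====
-- Literal transliteration of A: lower, then the if/elif chain appending to audio_elements.
def generate_audio_suggestions_py (prompt : String) : String :=
  let prompt_lower := PySem.Str.lower prompt
  let audio_elements : List String := []
  -- Nature/outdoor scenes
  let audio_elements :=
    if ["forest", "nature", "outdoor", "trees", "birds"].any (fun w => PySem.Str.isIn w prompt_lower) then
      audio_elements ++ ["gentle bird songs, rustling leaves"]
    else if ["ocean", "sea", "beach", "waves"].any (fun w => PySem.Str.isIn w prompt_lower) then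
      audio_elements ++ ["ocean waves, seagull calls"]
    else if ["city", "street", "urban", "traffic"].any (fun w => PySem.Str.isIn w prompt_lower) then
      audio_elements ++ ["distant city traffic, urban ambiance"]
    else audio_elements
  -- Character interactions
  let audio_elements :=
    if ["talking", "speaking", "conversation", "dialogue"].any (fun w => PySem.Str.isIn w prompt_lower) then
      audio_elements ++ ["clear dialogue, natural speech"]
    else if ["laughing", "happy", "joy"].any (fun w => PySem.Str.isIn w prompt_lower) then
      audio_elements ++ ["joyful laughter, cheerful voices"]
    else if ["crying", "sad", "emotional"].any (fun w => PySem.Str.isIn w prompt_lower) then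
      audio_elements ++ ["emotional breathing, soft sobs"]
    else audio_elements
  -- Action scenes
  let audio_elements :=
    if ["running", "chase", "fast", "action"].any (fun w => PySem.Str.isIn w prompt_lower) then
      audio_elements ++ ["footsteps, heavy breathing, dynamic movement sounds"]
    else if ["fighting", "battle", "combat"].any (fun w => PySem.Str.isIn w prompt_lower) then
      audio_elements ++ ["impact sounds, movement, tension"]
    else audio_elements
  -- Music/instruments
  let audio_elements :=
    if ["music", "piano", "guitar", "singing"].any (fun w => PySem.Str.isIn w prompt_lower) then
      audio_elements ++ ["melodic music, instrumental harmony"]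
    else if ["dancing", "party", "celebration"].any (fun w => PySem.Str.isIn w prompt_lower) then
      audio_elements ++ ["upbeat music, celebratory sounds"]
    else audio_elements
  -- Weather/environment
  let audio_elements :=
    if ["rain", "storm", "thunder"].any (fun w => PySem.Str.isIn w prompt_lower) then
      audio_elements ++ ["rainfall, distant thunder"]
    else if ["wind", "windy"].any (fun w => PySem.Str.isIn w prompt_lower) then
      audio_elements ++ ["gentle wind sounds"]
    else audio_elements
  -- Default ambient sound
  let audio_elements :=
    if audio_elements.isEmpty then audio_elements ++ ["subtle ambient sound, natural atmosphere"]
    else audio_elements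
  PySem.Str.join ", " audio_elements

-- ===== PORT B =====
-- the flat keyword index _KEYWORDS, in its insertion order: (keyword, group, rank)
def pvKeywords : List (String × Int × Int) :=
  [ ("forest", 0, 0), ("nature", 0, 0), ("outdoor", 0, 0), ("trees", 0, 0), ("birds", 0, 0),
    ("ocean", 0, 1), ("sea", 0, 1), ("beach", 0, 1), ("waves", 0, 1),
    ("city", 0, 2), ("street", 0, 2), ("urban", 0, 2), ("traffic", 0, 2),
    ("talking", 1, 0), ("speaking", 1, 0), ("conversation", 1, 0), ("dialogue", 1, 0),
    ("laughing", 1, 1), ("happy", 1, 1), ("joy", 1, 1),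
    ("crying", 1, 2), ("sad", 1, 2), ("emotional", 1, 2),
    ("running", 2, 0), ("chase", 2, 0), ("fast", 2, 0), ("action", 2, 0),
    ("fighting", 2, 1), ("battle", 2, 1), ("combat", 2, 1),
    ("music", 3, 0), ("piano", 3, 0), ("guitar", 3, 0), ("singing", 3, 0),
    ("dancing", 3, 1), ("party", 3, 1), ("celebration", 3, 1),
    ("rain", 4, 0), ("storm", 4, 0), ("thunder", 4, 0),
    ("wind", 4, 1), ("windy", 4, 1) ]

-- the table _SUGGESTIONS
def pvSuggestions : List (List String) :=
  [ ["gentle bird songs, rustling leaves", "ocean waves, seagull calls",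
     "distant city traffic, urban ambiance"],
    ["clear dialogue, natural speech", "joyful laughter, cheerful voices",
     "emotional breathing, soft sobs"],
    ["footsteps, heavy breathing, dynamic movement sounds", "impact sounds, movement, tension"],
    ["melodic music, instrumental harmony", "upbeat music, celebratory sounds"],
    ["rainfall, distant thunder", "gentle wind sounds"] ]

-- loop body: if kw in prompt_lower and (g not in best or r < best[g]): best[g] = r
def pvStep (pl : String) (d : PySem.Dict Int Int) (p : String × Int × Int) : PySem.Dict Int Int :=
  if PySem.Str.isIn p.1 pl then
    match d.get? p.2.1 with
    | none => d.insert p.2.1 p.2.2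
    | some cur => if p.2.2 < cur then d.insert p.2.1 p.2.2 else d
  else d

def generate_audio_suggestions_py_alt (prompt : String) : String :=
  let prompt_lower := PySem.Str.lower prompt
  let best := pvKeywords.foldl (pvStep prompt_lower) PySem.Dict.empty
  if best.size == 0 then "subtle ambient sound, natural atmosphere"
  else
    PySem.Str.join ", "
      ((PySem.List.sorted best.keys (fun k => k) false).map
        (fun g => PySem.List.pyGetD (PySem.List.pyGetD pvSuggestions g []) (best.getD g 0) ""))

-- ===== PRECONDITION & SPEC =====
def Spec_generate_audio_suggestions_py (prompt : String) (out : String) : Prop := out = generate_audio_suggestions_py_alt prompt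
instance (prompt : String) (out : String) : Decidable (Spec_generate_audio_suggestions_py prompt out) := by unfold Spec_generate_audio_suggestions_py; infer_instance

-- ===== CLAIM (what is proved, stated in full; the proofs are below) =====
def Claim_equal_generate_audio_suggestions_py : Prop := ∀ (prompt : String), Dom_generate_audio_suggestions_py prompt → Spec_generate_audio_suggestions_py prompt (generate_audio_suggestions_py prompt)

-- ===== LEMMAS AND PROOFS =====

-- a keyword whose rank is not below the group's current value is a no-op
theorem pvStep_noop (pl : String) (d : PySem.Dict Int Int) (kw : String) (g r cur : Int)
    (h : d.get? g = some cur) (hr : cur ≤ r) : pvStep pl d (kw, g, r) = d := by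
  unfold pvStep
  dsimp only
  by_cases hin : PySem.Str.isIn kw pl
  · rw [if_pos hin, h]
    dsimp only
    rw [if_neg (by omega)]
  · rw [if_neg hin]

-- the block of one group's keywords of one rank
def pvBlock (g r : Int) (ws : List String) : List (String × Int × Int) :=
  ws.map (fun w => (w, g, r))

-- a whole group, ranks counted from r0
def pvGroupPairs (g r0 : Int) : List (List String) → List (String × Int × Int)
  | [] => []
  | ws :: rest => pvBlock g r0 ws ++ pvGroupPairs g (r0 + 1) rest

-- the chosen rank for one group: the first rank whose keyword block matches
def pvChoose (pl : String) (r0 : Int) : List (List String) → Option Int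
  | [] => none
  | ws :: rest => if ws.any (fun w => PySem.Str.isIn w pl) then some r0
                  else pvChoose pl (r0 + 1) rest

def pvIns (d : PySem.Dict Int Int) (g : Int) (o : Option Int) : PySem.Dict Int Int :=
  match o with
  | none => d
  | some r => d.insert g r

theorem pvGroupPairs_mem (g r0 : Int) (rks : List (List String)) (p : String × Int × Int)
    (hp : p ∈ pvGroupPairs g r0 rks) : p.2.1 = g ∧ r0 ≤ p.2.2 := by
  induction rks generalizing r0 with
  | nil => simp [pvGroupPairs] at hp
  | cons ws rest ih =>
    simp only [pvGroupPairs, List.mem_append] at hp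
    rcases hp with hp | hp
    · simp only [pvBlock, List.mem_map] at hp
      obtain ⟨w, _, rfl⟩ := hp
      exact ⟨rfl, le_refl _⟩
    · have := ih (r0 + 1) hp
      exact ⟨this.1, by omega⟩

theorem pvFoldl_noop (pl : String) (pairs : List (String × Int × Int)) (d : PySem.Dict Int Int)
    (g cur : Int) (h : d.get? g = some cur)
    (hall : ∀ p ∈ pairs, p.2.1 = g ∧ cur ≤ p.2.2) :
    pairs.foldl (pvStep pl) d = d := by
  induction pairs with
  | nil => rfl
  | cons p rest ih =>
    obtain ⟨hg, hr⟩ := hall p (by simp)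
    rw [List.foldl_cons]
    obtain ⟨kw, g', r⟩ := p
    simp only at hg hr
    subst hg
    rw [pvStep_noop pl d kw g' r cur h hr]
    exact ih (fun q hq => hall q (by simp [hq]))

theorem pvBlock_foldl (pl : String) (ws : List String) (d : PySem.Dict Int Int) (g r : Int)
    (h : d.get? g = none) :
    (pvBlock g r ws).foldl (pvStep pl) d =
      if ws.any (fun w => PySem.Str.isIn w pl) then d.insert g r else d := by
  induction ws with
  | nil => simp [pvBlock]
  | cons w ws' ih =>
    simp only [pvBlock, List.map_cons, List.foldl_cons, List.any_cons]
    by_cases hw : PySem.Str.isIn w pl = true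
    · rw [show pvStep pl d (w, g, r) = d.insert g r by unfold pvStep; dsimp only; rw [h, if_pos hw]]
      have hno : List.foldl (pvStep pl) (d.insert g r) (List.map (fun w => (w, g, r)) ws') =
          d.insert g r := by
        refine pvFoldl_noop pl _ _ g r (PySem.Dict.get?_insert_self d g r) (fun p hp => ?_)
        simp only [List.mem_map] at hp
        obtain ⟨w', _, rfl⟩ := hp
        exact ⟨rfl, le_refl _⟩
      rw [hno, if_pos (by rw [hw, Bool.true_or])]
    · have hw0 : PySem.Str.isIn w pl = false := by simpa using hw
      rw [show pvStep pl d (w, g, r) = d by (unfold pvStep; dsimp only; rw [if_neg hw])]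
      simp only [pvBlock] at ih
      rw [ih]
      simp only [hw0, Bool.false_or]

theorem pvGroup_foldl (pl : String) (rks : List (List String)) (d : PySem.Dict Int Int) (g r0 : Int)
    (h : d.get? g = none) :
    (pvGroupPairs g r0 rks).foldl (pvStep pl) d = pvIns d g (pvChoose pl r0 rks) := by
  induction rks generalizing r0 with
  | nil => simp [pvGroupPairs, pvChoose, pvIns]
  | cons ws rest ih =>
    simp only [pvGroupPairs, List.foldl_append, pvChoose]
    rw [pvBlock_foldl pl ws d g r0 h]
    by_cases hw : ws.any (fun w => PySem.Str.isIn w pl)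
    · rw [if_pos hw, if_pos hw]
      rw [pvFoldl_noop pl _ _ g r0 (PySem.Dict.get?_insert_self d g r0)
        (fun p hp => pvGroupPairs_mem g (r0 + 1) rest p hp |>.imp id (by omega))]
      rfl
    · rw [if_neg hw, if_neg hw]
      exact ih (r0 + 1)

theorem pvIns_get?_ne (d : PySem.Dict Int Int) (g k : Int) (o : Option Int) (hne : k ≠ g) :
    (pvIns d g o).get? k = d.get? k := by
  cases o with
  | none => rfl
  | some r => exact PySem.Dict.get?_insert_of_ne d r hne

-- the five keyword groups of the flat index
def pvK0 : List (List String) :=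
  [["forest", "nature", "outdoor", "trees", "birds"], ["ocean", "sea", "beach", "waves"],
   ["city", "street", "urban", "traffic"]]
def pvK1 : List (List String) :=
  [["talking", "speaking", "conversation", "dialogue"], ["laughing", "happy", "joy"],
   ["crying", "sad", "emotional"]]
def pvK2 : List (List String) :=
  [["running", "chase", "fast", "action"], ["fighting", "battle", "combat"]]
def pvK3 : List (List String) :=
  [["music", "piano", "guitar", "singing"], ["dancing", "party", "celebration"]]
def pvK4 : List (List String) := [["rain", "storm", "thunder"], ["wind", "windy"]]

theorem pvKeywords_eq :
    pvKeywords = pvGroupPairs 0 0 pvK0 ++ pvGroupPairs 1 0 pvK1 ++ pvGroupPairs 2 0 pvK2 ++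
      pvGroupPairs 3 0 pvK3 ++ pvGroupPairs 4 0 pvK4 := rfl

def pvChain (c0 c1 c2 c3 c4 : Option Int) : PySem.Dict Int Int :=
  pvIns (pvIns (pvIns (pvIns (pvIns PySem.Dict.empty 0 c0) 1 c1) 2 c2) 3 c3) 4 c4

theorem pvChain_def (c0 c1 c2 c3 c4 : Option Int) :
    pvChain c0 c1 c2 c3 c4 =
      pvIns (pvIns (pvIns (pvIns (pvIns PySem.Dict.empty 0 c0) 1 c1) 2 c2) 3 c3) 4 c4 := rfl

theorem pvMain_fold (pl : String) :
    pvKeywords.foldl (pvStep pl) PySem.Dict.empty =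
      pvChain (pvChoose pl 0 pvK0) (pvChoose pl 0 pvK1) (pvChoose pl 0 pvK2)
        (pvChoose pl 0 pvK3) (pvChoose pl 0 pvK4) := by
  rw [pvKeywords_eq, pvChain_def]
  simp only [List.foldl_append]
  rw [pvGroup_foldl pl pvK0 _ 0 0 (by rfl)]
  rw [pvGroup_foldl pl pvK1 _ 1 0 (by rw [pvIns_get?_ne _ _ _ _ (by decide)]; rfl)]
  rw [pvGroup_foldl pl pvK2 _ 2 0 (by
    rw [pvIns_get?_ne _ _ _ _ (by decide), pvIns_get?_ne _ _ _ _ (by decide)]; rfl)]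
  rw [pvGroup_foldl pl pvK3 _ 3 0 (by
    rw [pvIns_get?_ne _ _ _ _ (by decide), pvIns_get?_ne _ _ _ _ (by decide),
        pvIns_get?_ne _ _ _ _ (by decide)]; rfl)]
  rw [pvGroup_foldl pl pvK4 _ 4 0 (by
    rw [pvIns_get?_ne _ _ _ _ (by decide), pvIns_get?_ne _ _ _ _ (by decide),
        pvIns_get?_ne _ _ _ _ (by decide), pvIns_get?_ne _ _ _ _ (by decide)]; rfl)]

-- an ascending Int list is its own sorted order
theorem pvSortedSelf (xs : List Int) (h : List.Pairwise (fun a b => a ≤ b) xs) :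
    PySem.List.sorted xs (fun k => k) = xs :=
  PySem.List.sorted_eq_self_of_pairwise _ _ (by simpa using h)

-- A's appended audio_elements list, as a function of the five per-group choices
def pvParts (c0 c1 c2 c3 c4 : Option Int) : List String :=
  ((((([] : List String)
    ++ (c0.map (fun r => PySem.List.pyGetD (PySem.List.pyGetD pvSuggestions 0 []) r "")).toList)
    ++ (c1.map (fun r => PySem.List.pyGetD (PySem.List.pyGetD pvSuggestions 1 []) r "")).toList)
    ++ (c2.map (fun r => PySem.List.pyGetD (PySem.List.pyGetD pvSuggestions 2 []) r "")).toList)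
    ++ (c3.map (fun r => PySem.List.pyGetD (PySem.List.pyGetD pvSuggestions 3 []) r "")).toList)
    ++ (c4.map (fun r => PySem.List.pyGetD (PySem.List.pyGetD pvSuggestions 4 []) r "")).toList

-- B's rendering of the five per-group choices equals A's appended-list rendering
theorem pvBridge (c0 c1 c2 c3 c4 : Option Int) :
    (if ((pvChain c0 c1 c2 c3 c4).size == 0) = true then "subtle ambient sound, natural atmosphere"
     else
       PySem.Str.join ", "
         ((PySem.List.sorted (pvChain c0 c1 c2 c3 c4).keys (fun k => k)).map
           (fun g => PySem.List.pyGetD (PySem.List.pyGetD pvSuggestions g [])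
             ((pvChain c0 c1 c2 c3 c4).getD g 0) "")))
    = PySem.Str.join ", "
        (if (pvParts c0 c1 c2 c3 c4).isEmpty = true then
          pvParts c0 c1 c2 c3 c4 ++ ["subtle ambient sound, natural atmosphere"]
         else pvParts c0 c1 c2 c3 c4) := by
  cases c0 <;> cases c1 <;> cases c2 <;> cases c3 <;> cases c4 <;>
    simp [pvChain, pvIns, pvParts, PySem.Dict.size_insert, PySem.Dict.contains_insert,
      PySem.Dict.keys_insert_of_not_contains, PySem.Dict.getD_insert, pvSortedSelf,
      PySem.Str.join]

-- A's five if/elif blocks, each as the rendering of the group's choice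
theorem pvA0 (pl : String) (acc : List String) :
    (if ["forest", "nature", "outdoor", "trees", "birds"].any (fun w => PySem.Str.isIn w pl) then
        acc ++ ["gentle bird songs, rustling leaves"]
      else if ["ocean", "sea", "beach", "waves"].any (fun w => PySem.Str.isIn w pl) then
        acc ++ ["ocean waves, seagull calls"]
      else if ["city", "street", "urban", "traffic"].any (fun w => PySem.Str.isIn w pl) then
        acc ++ ["distant city traffic, urban ambiance"]
      else acc)
    = acc ++ ((pvChoose pl 0 pvK0).map
        (fun r => PySem.List.pyGetD (PySem.List.pyGetD pvSuggestions 0 []) r "")).toList := by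
  simp only [pvChoose, pvK0]
  split_ifs <;> simp <;> rfl

theorem pvA1 (pl : String) (acc : List String) :
    (if ["talking", "speaking", "conversation", "dialogue"].any (fun w => PySem.Str.isIn w pl) then
        acc ++ ["clear dialogue, natural speech"]
      else if ["laughing", "happy", "joy"].any (fun w => PySem.Str.isIn w pl) then
        acc ++ ["joyful laughter, cheerful voices"]
      else if ["crying", "sad", "emotional"].any (fun w => PySem.Str.isIn w pl) then
        acc ++ ["emotional breathing, soft sobs"]
      else acc)
    = acc ++ ((pvChoose pl 0 pvK1).map
        (fun r => PySem.List.pyGetD (PySem.List.pyGetD pvSuggestions 1 []) r "")).toList := by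
  simp only [pvChoose, pvK1]
  split_ifs <;> simp <;> rfl

theorem pvA2 (pl : String) (acc : List String) :
    (if ["running", "chase", "fast", "action"].any (fun w => PySem.Str.isIn w pl) then
        acc ++ ["footsteps, heavy breathing, dynamic movement sounds"]
      else if ["fighting", "battle", "combat"].any (fun w => PySem.Str.isIn w pl) then
        acc ++ ["impact sounds, movement, tension"]
      else acc)
    = acc ++ ((pvChoose pl 0 pvK2).map
        (fun r => PySem.List.pyGetD (PySem.List.pyGetD pvSuggestions 2 []) r "")).toList := by
  simp only [pvChoose, pvK2]
  split_ifs <;> simp <;> rfl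

theorem pvA3 (pl : String) (acc : List String) :
    (if ["music", "piano", "guitar", "singing"].any (fun w => PySem.Str.isIn w pl) then
        acc ++ ["melodic music, instrumental harmony"]
      else if ["dancing", "party", "celebration"].any (fun w => PySem.Str.isIn w pl) then
        acc ++ ["upbeat music, celebratory sounds"]
      else acc)
    = acc ++ ((pvChoose pl 0 pvK3).map
        (fun r => PySem.List.pyGetD (PySem.List.pyGetD pvSuggestions 3 []) r "")).toList := by
  simp only [pvChoose, pvK3]
  split_ifs <;> simp <;> rfl

theorem pvA4 (pl : String) (acc : List String) :
    (if ["rain", "storm", "thunder"].any (fun w => PySem.Str.isIn w pl) then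
        acc ++ ["rainfall, distant thunder"]
      else if ["wind", "windy"].any (fun w => PySem.Str.isIn w pl) then
        acc ++ ["gentle wind sounds"]
      else acc)
    = acc ++ ((pvChoose pl 0 pvK4).map
        (fun r => PySem.List.pyGetD (PySem.List.pyGetD pvSuggestions 4 []) r "")).toList := by
  simp only [pvChoose, pvK4]
  split_ifs <;> simp <;> rfl

-- ===== VERDICT (by name: the statement is the Claim_ definition above) =====
theorem generate_audio_suggestions_py_spec : Claim_equal_generate_audio_suggestions_py := by
  intro prompt _
  simp only [Spec_generate_audio_suggestions_py, generate_audio_suggestions_py,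
    generate_audio_suggestions_py_alt]
  rw [pvMain_fold, pvBridge, pvA0, pvA1, pvA2, pvA3, pvA4]
  rfl
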